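-- pv_equiv track=rewrite | github.com/osercinoglu/grinn | grinn_workflow.py | assign_chain_ids_from_molecule_mapping
-- ===== SOURCE A (Python) =====
-- def assign_chain_ids_from_molecule_mapping(residue_to_molecule, molecules_order, logger=None):
--     """
--     Assign chain IDs based on molecule mapping, respecting molecule instance order.
--
--     Returns:
--     - dict: Mapping of residue index to chain ID
--     """
--     chain_assignments = {}
--
--     try:
--         # Create chain ID generator
--         chain_letters = 'ABCDEFGHIJKLMNOPQRSTUVWXYZ'
--         chain_idx = 0
--
--         # Group residues by molecule type and assign chains per instance
--         for mol_name, mol_count in molecules_order: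
--             # Get all residues for this molecule type
--             mol_residues = [res_idx for res_idx, mol in residue_to_molecule.items() if mol == mol_name]
--             mol_residues.sort()
--
--             if not mol_residues:
--                 continue
--
--             # Calculate residues per instance
--             residues_per_instance = len(mol_residues) // mol_count if mol_count > 0 else len(mol_residues)
--
--             # Assign chain IDs to each instance
--             for instance in range(mol_count):
--                 if chain_idx < len(chain_letters):
--                     chain_id = chain_letters[chain_idx]
--                 else:
--                     # Use double letters for chains beyond Z
--                     first_letter_idx = (chain_idx - 26) // 26
--                     second_letter_idx = (chain_idx - 26) % 26
--                     chain_id = chain_letters[first_letter_idx] + chain_letters[second_letter_idx]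
--
--                 # Assign this chain ID to residues in this instance
--                 start_idx = instance * residues_per_instance
--                 end_idx = start_idx + residues_per_instance
--
--                 for res_idx in mol_residues[start_idx:end_idx]:
--                     chain_assignments[res_idx] = chain_id
--
--                 chain_idx += 1
--
--         # Handle 'Other' residues (assign to separate chain)
--         other_residues = [res_idx for res_idx, mol in residue_to_molecule.items() if mol == 'Other']
--         if other_residues:
--             if chain_idx < len(chain_letters):
--                 other_chain_id = chain_letters[chain_idx]
--             else:
--                 first_letter_idx = (chain_idx - 26) // 26
--                 second_letter_idx = (chain_idx - 26) % 26
--                 other_chain_id = chain_letters[first_letter_idx] + chain_letters[second_letter_idx]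
--
--             for res_idx in other_residues:
--                 chain_assignments[res_idx] = other_chain_id
--
--         return chain_assignments
--
--     except Exception as e:
--         if logger:
--             logger.warning(f"Error assigning chain IDs from molecule mapping: {str(e)}")
--         return {}
-- ===== SOURCE B (Python) =====
-- def assign_chain_ids_from_molecule_mapping(residue_to_molecule, molecules_order, logger=None):
--     """
--     Assign chain IDs based on molecule mapping, respecting molecule instance order.
--
--     Returns:
--     - dict: Mapping of residue index to chain ID
--     """
--     chain_letters = 'ABCDEFGHIJKLMNOPQRSTUVWXYZ'
--
--     def chain_label(idx):
--         if idx < len(chain_letters):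
--             return chain_letters[idx]
--         return chain_letters[(idx - 26) // 26] + chain_letters[(idx - 26) % 26]
--
--     # One pass: bucket residue indices by molecule name (no per-molecule rescans).
--     buckets = {}
--     for res_idx, mol in residue_to_molecule.items():
--         buckets.setdefault(mol, []).append(res_idx)
--
--     chain_assignments = {}
--     chain_idx = 0
--     for mol_name, mol_count in molecules_order:
--         mol_residues = sorted(buckets.get(mol_name, []))
--         if not mol_residues:
--             continue
--         per = len(mol_residues) // mol_count if mol_count > 0 else len(mol_residues)
--         for instance in range(mol_count):
--             cid = chain_label(chain_idx)
--             start = instance * per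
--             for res_idx in mol_residues[start:start + per]:
--                 chain_assignments[res_idx] = cid
--             chain_idx += 1
--
--     other = buckets.get('Other', [])
--     if other:
--         cid = chain_label(chain_idx)
--         for res_idx in other:
--             chain_assignments[res_idx] = cid
--     return chain_assignments
-- ===== Notes on version B (the rewrite author's own statement) =====
-- stated objective: faster
-- what changed: B replaces A's per-molecule-type rescan of the whole residue dict (and the extra 'Other' rescan) by a single bucketing pass that groups residue indices by molecule name into a dict of lists, which the assignment loop then just looks up.
-- outside the precondition, e.g. on assign_chain_ids_from_molecule_mapping({0: 'X'}, [('X', 703)], None): A returns {}, B raises IndexError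
import Mathlib
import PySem

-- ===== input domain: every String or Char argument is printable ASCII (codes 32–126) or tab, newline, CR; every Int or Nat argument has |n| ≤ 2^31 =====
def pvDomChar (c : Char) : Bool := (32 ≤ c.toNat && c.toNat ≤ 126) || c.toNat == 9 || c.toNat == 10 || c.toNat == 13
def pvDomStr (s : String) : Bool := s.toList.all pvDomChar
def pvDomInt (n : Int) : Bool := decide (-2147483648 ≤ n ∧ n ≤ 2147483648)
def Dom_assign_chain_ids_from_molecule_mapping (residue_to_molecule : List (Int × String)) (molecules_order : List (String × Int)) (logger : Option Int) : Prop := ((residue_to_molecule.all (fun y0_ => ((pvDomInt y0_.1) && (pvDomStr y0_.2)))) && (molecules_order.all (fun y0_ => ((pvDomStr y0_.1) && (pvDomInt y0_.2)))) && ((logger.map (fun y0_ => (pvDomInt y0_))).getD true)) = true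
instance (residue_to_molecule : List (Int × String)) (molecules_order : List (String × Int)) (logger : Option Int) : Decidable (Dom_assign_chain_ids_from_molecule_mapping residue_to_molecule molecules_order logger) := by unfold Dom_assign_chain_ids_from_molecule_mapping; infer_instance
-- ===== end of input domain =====

-- B replaces A's per-molecule rescans of the residue dict by one bucketing pass over it
-- (dict molecule-name → residue list), leaving the chain-assignment loop a lookup; objective: faster.
-- A's try/except (which swallows the IndexError past chain index 701 and returns {}) is outside Pre_,
-- so neither port models it; inside Pre_ every letter index is in range and the .getD 'A' defaults never fire.

-- ===== PORT A =====
def assign_chain_ids_from_molecule_mapping (residue_to_molecule : List (Int × String)) (molecules_order : List (String × Int)) (logger : Option Int) : List (Int × String) :=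
  let chain_letters := "ABCDEFGHIJKLMNOPQRSTUVWXYZ"
  let items := (PySem.Dict.ofList residue_to_molecule).items
  let st := molecules_order.foldl (fun (st : PySem.Dict Int String × Int) nm =>
    let mol_residues := PySem.List.sorted ((items.filter (fun p => p.2 == nm.1)).map (fun p => p.1)) (fun x => x) false
    if mol_residues = [] then st
    else
      let residues_per_instance : Int :=
        if nm.2 > 0 then PySem.Int.floordiv (mol_residues.length : Int) nm.2 else (mol_residues.length : Int)
      (PySem.List.pyRange 0 nm.2 1).foldl (fun (st2 : PySem.Dict Int String × Int) inst =>
        let chain_id :=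
          if st2.2 < PySem.Str.len chain_letters then
            String.ofList [(PySem.Str.pyGet? chain_letters st2.2).getD 'A']
          else
            String.ofList [(PySem.Str.pyGet? chain_letters (PySem.Int.floordiv (st2.2 - 26) 26)).getD 'A',
                       (PySem.Str.pyGet? chain_letters (PySem.Int.mod (st2.2 - 26) 26)).getD 'A']
        let start_idx := inst * residues_per_instance
        let end_idx := start_idx + residues_per_instance
        let ca := (PySem.List.slice mol_residues (some start_idx) (some end_idx)).foldl
                    (fun d r => d.insert r chain_id) st2.1
        (ca, st2.2 + 1)) st
  ) (PySem.Dict.empty, 0)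
  let other_residues := (items.filter (fun p => p.2 == "Other")).map (fun p => p.1)
  let ca :=
    if other_residues = [] then st.1
    else
      let other_chain_id :=
        if st.2 < PySem.Str.len chain_letters then
          String.ofList [(PySem.Str.pyGet? chain_letters st.2).getD 'A']
        else
          String.ofList [(PySem.Str.pyGet? chain_letters (PySem.Int.floordiv (st.2 - 26) 26)).getD 'A',
                     (PySem.Str.pyGet? chain_letters (PySem.Int.mod (st.2 - 26) 26)).getD 'A']
      other_residues.foldl (fun d r => d.insert r other_chain_id) st.1
  ca.items

-- ===== PORT B =====
-- chain_label helper of Source B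
def chainLabel (idx : Int) : String :=
  if idx < PySem.Str.len "ABCDEFGHIJKLMNOPQRSTUVWXYZ" then
    String.ofList [(PySem.Str.pyGet? "ABCDEFGHIJKLMNOPQRSTUVWXYZ" idx).getD 'A']
  else
    String.ofList [(PySem.Str.pyGet? "ABCDEFGHIJKLMNOPQRSTUVWXYZ" (PySem.Int.floordiv (idx - 26) 26)).getD 'A',
               (PySem.Str.pyGet? "ABCDEFGHIJKLMNOPQRSTUVWXYZ" (PySem.Int.mod (idx - 26) 26)).getD 'A']

-- the one-pass bucketing loop of Source B: buckets.setdefault(mol, []).append(res_idx)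
def pvBuckets (residue_to_molecule : List (Int × String)) : PySem.Dict String (List Int) :=
  (PySem.Dict.ofList residue_to_molecule).items.foldl
    (fun b p => b.modify p.2 [] (fun l => l ++ [p.1])) PySem.Dict.empty

def assign_chain_ids_from_molecule_mapping_alt (residue_to_molecule : List (Int × String)) (molecules_order : List (String × Int)) (logger : Option Int) : List (Int × String) :=
  let buckets := pvBuckets residue_to_molecule
  let st := molecules_order.foldl (fun (st : PySem.Dict Int String × Int) nm =>
    let mol_residues := PySem.List.sorted (buckets.getD nm.1 []) (fun x => x) false
    if mol_residues = [] then st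
    else
      let per : Int :=
        if nm.2 > 0 then PySem.Int.floordiv (mol_residues.length : Int) nm.2 else (mol_residues.length : Int)
      (PySem.List.pyRange 0 nm.2 1).foldl (fun (st2 : PySem.Dict Int String × Int) inst =>
        let cid := chainLabel st2.2
        let start := inst * per
        let ca := (PySem.List.slice mol_residues (some start) (some (start + per))).foldl
                    (fun d r => d.insert r cid) st2.1
        (ca, st2.2 + 1)) st
  ) (PySem.Dict.empty, 0)
  let other := buckets.getD "Other" []
  let ca :=
    if other = [] then st.1
    else
      let cid := chainLabel st.2
      other.foldl (fun d r => d.insert r cid) st.1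
  ca.items

-- ===== PRECONDITION & SPEC =====
-- number of chain indices A consumes: each molecule entry whose name has residues consumes max(count, 0)
def pvUsedChains (residue_to_molecule : List (Int × String)) (molecules_order : List (String × Int)) : Int :=
  (molecules_order.map (fun nm =>
    if (PySem.Dict.ofList residue_to_molecule).items.any (fun p => p.2 == nm.1) then max nm.2 0 else 0)).sum

-- Pre_ excludes the inputs that need a chain index past 'ZZ' (index 702), where A's letter lookup
-- raises IndexError which its blanket except swallows into {} (or, with a truthy logger, becomes an
-- AttributeError), while B's natural code raises IndexError there.
def Pre_assign_chain_ids_from_molecule_mapping (residue_to_molecule : List (Int × String)) (molecules_order : List (String × Int)) (logger : Option Int) : Prop :=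
  pvUsedChains residue_to_molecule molecules_order +
    (if (PySem.Dict.ofList residue_to_molecule).items.any (fun p => p.2 == "Other") then 1 else 0) ≤ 702
instance (residue_to_molecule : List (Int × String)) (molecules_order : List (String × Int)) (logger : Option Int) : Decidable (Pre_assign_chain_ids_from_molecule_mapping residue_to_molecule molecules_order logger) := by unfold Pre_assign_chain_ids_from_molecule_mapping; infer_instance

def pvWitness_assign_chain_ids_from_molecule_mapping : (List (Int × String)) × (List (String × Int)) × Option Int :=
  ([(1, "W"), (0, "W"), (2, "Other")], [("W", 2)], none)

def Spec_assign_chain_ids_from_molecule_mapping (residue_to_molecule : List (Int × String)) (molecules_order : List (String × Int)) (logger : Option Int) (out : List (Int × String)) : Prop := out = assign_chain_ids_from_molecule_mapping_alt residue_to_molecule molecules_order logger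
instance (residue_to_molecule : List (Int × String)) (molecules_order : List (String × Int)) (logger : Option Int) (out : List (Int × String)) : Decidable (Spec_assign_chain_ids_from_molecule_mapping residue_to_molecule molecules_order logger out) := by unfold Spec_assign_chain_ids_from_molecule_mapping; infer_instance

-- ===== CLAIM (what is proved, stated in full; the proofs are below) =====
def Claim_equal_assign_chain_ids_from_molecule_mapping : Prop := ∀ (residue_to_molecule : List (Int × String)) (molecules_order : List (String × Int)) (logger : Option Int), Dom_assign_chain_ids_from_molecule_mapping residue_to_molecule molecules_order logger → Pre_assign_chain_ids_from_molecule_mapping residue_to_molecule molecules_order logger → Spec_assign_chain_ids_from_molecule_mapping residue_to_molecule molecules_order logger (assign_chain_ids_from_molecule_mapping residue_to_molecule molecules_order logger)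

-- ===== LEMMAS AND PROOFS =====

-- B's bucket for a name holds exactly the residues A's per-name scan collects, in the same order
theorem pvBuckets_getD (L : List (Int × String)) (c : String) :
    (L.foldl (fun b p => b.modify p.2 [] (fun l => l ++ [p.1])) PySem.Dict.empty).getD c []
      = (L.filter (fun p => p.2 == c)).map (fun p => p.1) := by
  have h := PySem.Dict.getD_foldl_modify_append (l := L.map (fun p => (p.2, p.1)))
    (d := (PySem.Dict.empty : PySem.Dict String (List Int))) (c := c)
  rw [List.foldl_map] at h
  simpa [List.filter_map, Function.comp, List.map_map] using h

-- ===== VERDICT (by name: the statement is the Claim_ definition above) =====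
theorem assign_chain_ids_from_molecule_mapping_spec : Claim_equal_assign_chain_ids_from_molecule_mapping := by
  intro rtm mo logger _hdom _hpre
  unfold Spec_assign_chain_ids_from_molecule_mapping
  unfold assign_chain_ids_from_molecule_mapping assign_chain_ids_from_molecule_mapping_alt
  simp only [pvBuckets, chainLabel, pvBuckets_getD]
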